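-- pv_equiv track=rewrite | github.com/Staalduine/flow_analysis_comps | flow_analysis_comps/processing/graph_extraction/graph_utils.py | get_neighbours2
-- ===== SOURCE A (Python) =====
-- def get_neighbours2(pixel, xs, ys):
--     x = pixel[0]
--     y = pixel[1]
--     primary_neighbours = {(x + 1, y), (x - 1, y), (x, y + 1), (x, y - 1)}
--     secondary_neighbours = {
--         (x + 1, y - 1),
--         (x + 1, y + 1),
--         (x - 1, y + 1),
--         (x - 1, y - 1),
--     }
--     pixel_list = [(x, ys[i]) for i, x in enumerate(xs)]
--     # num_neighbours = 0
--     actual_neighbours = set()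
--     for neighbour in primary_neighbours:
--         if neighbour in pixel_list:
--             xp = neighbour[0]
--             yp = neighbour[1]
--             primary_neighboursp = {
--                 (xp + 1, yp),
--                 (xp - 1, yp),
--                 (xp, yp + 1),
--                 (xp, yp - 1),
--             }
--             for neighbourp in primary_neighboursp:
--                 secondary_neighbours.discard(neighbourp)
--             actual_neighbours.add(neighbour)
--     for neighbour in secondary_neighbours:
--         if neighbour in pixel_list:
--             actual_neighbours.add(neighbour)
--     return actual_neighbours
-- ===== SOURCE B (Python) =====
-- def get_neighbours2(pixel, xs, ys):
--     x, y = pixel[0], pixel[1]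
--     present = set(zip(xs, ys))
--     result = {p for p in ((x + 1, y), (x - 1, y), (x, y + 1), (x, y - 1)) if p in present}
--     for dx, dy in ((1, -1), (1, 1), (-1, 1), (-1, -1)):
--         if (x + dx, y + dy) in present and (x + dx, y) not in present and (x, y + dy) not in present:
--             result.add((x + dx, y + dy))
--     return result
-- ===== Notes on version B (the rewrite author's own statement) =====
-- stated objective: simpler
-- what changed: B drops A's mutable discard-set bookkeeping (building each present primary's own primary set and discarding it from the secondaries): it builds one present-set from zip(xs, ys), keeps present orthogonal neighbours, and keeps a diagonal only if it is present and neither of its two edge-adjacent orthogonal neighbours is present.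
import Mathlib
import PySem

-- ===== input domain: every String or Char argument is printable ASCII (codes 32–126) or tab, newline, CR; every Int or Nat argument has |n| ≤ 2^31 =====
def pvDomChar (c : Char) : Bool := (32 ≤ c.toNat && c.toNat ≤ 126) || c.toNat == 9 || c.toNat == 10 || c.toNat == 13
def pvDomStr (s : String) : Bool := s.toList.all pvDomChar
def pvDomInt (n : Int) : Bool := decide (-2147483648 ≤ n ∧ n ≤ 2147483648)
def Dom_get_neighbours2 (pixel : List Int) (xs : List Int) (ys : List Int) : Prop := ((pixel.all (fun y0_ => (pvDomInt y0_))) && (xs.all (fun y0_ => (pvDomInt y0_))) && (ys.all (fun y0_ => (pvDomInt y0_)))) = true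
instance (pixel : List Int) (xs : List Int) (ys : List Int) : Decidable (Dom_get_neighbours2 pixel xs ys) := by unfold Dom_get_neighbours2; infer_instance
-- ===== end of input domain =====

-- B replaces A's discard-set bookkeeping by a direct adjacency test on each diagonal (objective: simpler).
-- Both programs return a Python set (set iteration order unobservable in the result); the ports list its elements in insertion order.

-- ===== PORT A =====
def get_neighbours2 (pixel : List Int) (xs : List Int) (ys : List Int) : List (Int × Int) :=
  match PySem.List.pyGet? pixel 0, PySem.List.pyGet? pixel 1 with
  | some x, some y =>
    let primary_neighbours : PySem.Set (Int × Int) :=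
      PySem.Set.ofList [(x+1, y), (x-1, y), (x, y+1), (x, y-1)]
    let secondary_neighbours : PySem.Set (Int × Int) :=
      PySem.Set.ofList [(x+1, y-1), (x+1, y+1), (x-1, y+1), (x-1, y-1)]
    -- ys[i]: in range for every produced i under Pre_ (xs.length ≤ ys.length), where pyGetD is exact
    let pixel_list : List (Int × Int) :=
      (PySem.List.enumerate xs).map (fun p => (p.2, PySem.List.pyGetD ys p.1 0))
    let st := primary_neighbours.foldl
      (fun (st : PySem.Set (Int × Int) × PySem.Set (Int × Int)) neighbour =>
        if pixel_list.contains neighbour then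
          let xp := neighbour.1
          let yp := neighbour.2
          let primp : PySem.Set (Int × Int) :=
            PySem.Set.ofList [(xp+1, yp), (xp-1, yp), (xp, yp+1), (xp, yp-1)]
          (primp.foldl (fun s q => PySem.Set.discard s q) st.1,
           PySem.Set.add st.2 neighbour)
        else st)
      (secondary_neighbours, PySem.Set.empty)
    st.1.foldl (fun acc n => if pixel_list.contains n then PySem.Set.add acc n else acc) st.2
  | _, _ => []   -- pixel[0] / pixel[1] would raise IndexError: excluded by Pre_

-- ===== PORT B =====
def get_neighbours2_alt (pixel : List Int) (xs : List Int) (ys : List Int) : List (Int × Int) :=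
  match PySem.List.pyGet? pixel 0 with
  | none => []   -- pixel[0] would raise IndexError: excluded by Pre_
  | some x =>
  match PySem.List.pyGet? pixel 1 with
  | none => []   -- pixel[1] would raise IndexError: excluded by Pre_
  | some y =>
    let present : PySem.Set (Int × Int) := PySem.Set.ofList (xs.zip ys)
    let result : PySem.Set (Int × Int) :=
      PySem.Set.ofList (([(x+1, y), (x-1, y), (x, y+1), (x, y-1)]).filter
        (fun p => present.contains p))
    ([((1:Int), (-1:Int)), (1, 1), (-1, 1), (-1, -1)]).foldl
      (fun res d =>
        if present.contains (x + d.1, y + d.2) && !present.contains (x + d.1, y)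
            && !present.contains (x, y + d.2)
        then PySem.Set.add res (x + d.1, y + d.2) else res)
      result

-- ===== PRECONDITION & SPEC =====
-- Pre_ excludes exactly the IndexError inputs: pixel shorter than 2 (pixel[1]) or ys shorter than xs (ys[i]).
def Pre_get_neighbours2 (pixel : List Int) (xs : List Int) (ys : List Int) : Prop :=
  2 ≤ pixel.length ∧ xs.length ≤ ys.length
instance (pixel : List Int) (xs : List Int) (ys : List Int) : Decidable (Pre_get_neighbours2 pixel xs ys) := by unfold Pre_get_neighbours2; infer_instance

def pvWitness_get_neighbours2 : List Int × List Int × List Int := ([0, 0], [1, 1, 0], [0, 1, 1])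

def Spec_get_neighbours2 (pixel : List Int) (xs : List Int) (ys : List Int) (out : List (Int × Int)) : Prop := out = get_neighbours2_alt pixel xs ys
instance (pixel : List Int) (xs : List Int) (ys : List Int) (out : List (Int × Int)) : Decidable (Spec_get_neighbours2 pixel xs ys out) := by unfold Spec_get_neighbours2; infer_instance

-- ===== CLAIM (what is proved, stated in full; the proofs are below) =====
def Claim_equal_get_neighbours2 : Prop := ∀ (pixel : List Int) (xs : List Int) (ys : List Int), Dom_get_neighbours2 pixel xs ys → Pre_get_neighbours2 pixel xs ys → Spec_get_neighbours2 pixel xs ys (get_neighbours2 pixel xs ys)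

-- ===== LEMMAS AND PROOFS =====

-- A's pixel_list comprehension is exactly zip(xs, ys) when ys is long enough.
lemma pixel_list_eq_zip (xs ys : List Int) (s : Nat) (h : s + xs.length ≤ ys.length) :
    (PySem.List.enumerate xs (s : Int)).map (fun p => (p.2, PySem.List.pyGetD ys p.1 0))
      = xs.zip (ys.drop s) := by
  induction xs generalizing s with
  | nil => simp [PySem.List.enumerate_nil]
  | cons a t ih =>
    have hs : s < ys.length := by simp at h; omega
    rw [PySem.List.enumerate_cons, List.map_cons]
    have h1 : PySem.List.pyGetD ys (s : Int) 0 = ys[s] := by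
      rw [PySem.List.pyGetD_eq_getElem] <;> simp [hs]
    have h3 : ((s : Int) + 1) = ((s + 1 : Nat) : Int) := by push_cast; ring
    rw [h1, h3, ih (s + 1) (by simp at h ⊢; omega),
        List.drop_eq_getElem_cons hs, List.zip_cons_cons]

-- disequalities simp needs to evaluate the set literals
lemma pvne2 (x : Int) : (x : Int) ≠ x - 1 := by omega
lemma pvne6 (x : Int) : (x + 1 : Int) ≠ x - 1 := by omega
lemma pvne10 (x : Int) : (x - 1 : Int) ≠ x + 1 := by omega
lemma pvnorm (x : Int) : x + -1 = x - 1 := by ring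

-- A diagonal survives A's discard loop iff none of its two edge-adjacent primaries is present:
-- case split on the four primary memberships and evaluate both folds.
set_option maxHeartbeats 2000000 in
lemma core_eq (x y : Int) (L : List (Int × Int)) :
    (let primary_neighbours : PySem.Set (Int × Int) :=
      PySem.Set.ofList [(x+1, y), (x-1, y), (x, y+1), (x, y-1)]
    let secondary_neighbours : PySem.Set (Int × Int) :=
      PySem.Set.ofList [(x+1, y-1), (x+1, y+1), (x-1, y+1), (x-1, y-1)]
    let st := primary_neighbours.foldl
      (fun (st : PySem.Set (Int × Int) × PySem.Set (Int × Int)) neighbour =>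
        if L.contains neighbour then
          let xp := neighbour.1
          let yp := neighbour.2
          let primp : PySem.Set (Int × Int) :=
            PySem.Set.ofList [(xp+1, yp), (xp-1, yp), (xp, yp+1), (xp, yp-1)]
          (primp.foldl (fun s q => PySem.Set.discard s q) st.1,
           PySem.Set.add st.2 neighbour)
        else st)
      (secondary_neighbours, PySem.Set.empty)
    st.1.foldl (fun acc n => if L.contains n then PySem.Set.add acc n else acc) st.2)
    =
    (let present : PySem.Set (Int × Int) := PySem.Set.ofList L
    let result : PySem.Set (Int × Int) :=
      PySem.Set.ofList (([(x+1, y), (x-1, y), (x, y+1), (x, y-1)]).filter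
        (fun p => present.contains p))
    ([((1:Int), (-1:Int)), (1, 1), (-1, 1), (-1, -1)]).foldl
      (fun res d =>
        if present.contains (x + d.1, y + d.2) && !present.contains (x + d.1, y)
            && !present.contains (x, y + d.2)
        then PySem.Set.add res (x + d.1, y + d.2) else res)
      result) := by
  by_cases h1 : ((x+1, y)) ∈ L <;> by_cases h2 : ((x-1, y)) ∈ L <;>
    by_cases h3 : ((x, y+1)) ∈ L <;> by_cases h4 : ((x, y-1)) ∈ L <;>
    simp [PySem.Set.ofList_eq_self_of_nodup, PySem.Set.mem_ofList, PySem.Set.add,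
          PySem.Set.discard, PySem.Set.empty,
          h1, h2, h3, h4, Prod.mk.injEq, pvnorm, pvne2, pvne6, pvne10]

-- ===== VERDICT (by name: the statement is the Claim_ definition above) =====
theorem get_neighbours2_spec : Claim_equal_get_neighbours2 := by
  intro pixel xs ys _ hpre
  obtain ⟨hp, hlen⟩ := hpre
  match pixel, hp with
  | p0 :: p1 :: rest, _ =>
    unfold Spec_get_neighbours2 get_neighbours2 get_neighbours2_alt
    have h0 : PySem.List.pyGet? (p0 :: p1 :: rest) (0 : Int) = some p0 := by
      simp [PySem.List.pyGet?, PySem.List.pyIdx?,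
            show (0:Int) ≤ (rest.length:Int) + 1 by positivity]
    have h1 : PySem.List.pyGet? (p0 :: p1 :: rest) (1 : Int) = some p1 := by
      simp [PySem.List.pyGet?, PySem.List.pyIdx?]
    rw [h0, h1]
    have hpl := pixel_list_eq_zip xs ys 0 (by simpa using hlen)
    simp only [Nat.cast_zero, List.drop_zero] at hpl
    simp only [hpl]
    exact core_eq p0 p1 (xs.zip ys)
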